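-- pv_equiv track=rewrite | github.com/kalai-vani-10/MovieTicketBooking | prj4_moviebooking.py | createseats
-- ===== SOURCE A (Python) =====
-- def createseats(rows, cols):
--     seat_no = 1
--     seating_chart = []
--     for row in range(rows):
--         current_row = []
--         for col in range(cols):
--             current_row.append(f's{seat_no}')
--             seat_no += 1
--         seating_chart.append(current_row)
--     return seating_chart
-- ===== SOURCE B (Python) =====
-- def createseats(rows, cols):
--     # Stage 1: one flat linear pass builds every label in order.
--     n = max(rows, 0) * max(cols, 0)
--     labels = [f's{i}' for i in range(1, n + 1)]
--     # Stage 2: reshape the flat list into the 2D grid by slicing.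
--     return [labels[r * cols:(r + 1) * cols] for r in range(rows)]
-- ===== Notes on version B (the rewrite author's own statement) =====
-- stated objective: alternative
-- what changed: B builds all rows*cols labels in one flat linear pass and then reshapes them into the 2D grid by slicing, instead of threading a running seat counter through nested loops with per-row accumulator lists.
import Mathlib
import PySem

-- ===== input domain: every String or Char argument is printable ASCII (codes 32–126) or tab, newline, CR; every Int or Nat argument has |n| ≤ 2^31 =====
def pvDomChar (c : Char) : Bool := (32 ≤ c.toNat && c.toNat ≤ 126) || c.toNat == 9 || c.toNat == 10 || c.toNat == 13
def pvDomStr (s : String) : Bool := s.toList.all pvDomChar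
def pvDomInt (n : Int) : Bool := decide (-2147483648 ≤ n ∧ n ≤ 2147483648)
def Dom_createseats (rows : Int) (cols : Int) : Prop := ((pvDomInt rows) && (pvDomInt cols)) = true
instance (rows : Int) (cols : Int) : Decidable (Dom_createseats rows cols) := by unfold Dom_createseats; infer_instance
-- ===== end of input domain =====

-- B builds all rows*cols labels in one flat linear pass and then reshapes them into the 2D
-- grid by slicing, instead of threading a running seat counter through nested loops with
-- per-row accumulator lists (objective: alternative).
-- In port A, Python list appends are ported as Array.push (Python's O(1) append), converted to List at the end.

-- ===== PORT A =====
def createseats (rows : Int) (cols : Int) : List (List String) :=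
  (((PySem.List.pyRange 0 rows 1).foldl
      (fun (st : Int × Array (List String)) _row =>
        let inner := (PySem.List.pyRange 0 cols 1).foldl
          (fun (p : Int × Array String) _col => (p.1 + 1, p.2.push ("s" ++ PySem.Int.toStr p.1)))
          (st.1, #[])
        (inner.1, st.2.push inner.2.toList))
      (1, #[])).2).toList

-- ===== PORT B =====
def createseats_alt (rows : Int) (cols : Int) : List (List String) :=
  let n := (max rows 0) * (max cols 0)
  let labels := (PySem.List.pyRange 1 (n + 1) 1).map
    (fun i => "s" ++ PySem.Int.toStr i)
  (PySem.List.pyRange 0 rows 1).map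
    (fun r => PySem.List.slice labels (some (r * cols)) (some ((r + 1) * cols)))

-- ===== PRECONDITION & SPEC =====
def Spec_createseats (rows : Int) (cols : Int) (out : List (List String)) : Prop := out = createseats_alt rows cols
instance (rows : Int) (cols : Int) (out : List (List String)) : Decidable (Spec_createseats rows cols out) := by unfold Spec_createseats; infer_instance

-- ===== CLAIM (what is proved, stated in full; the proofs are below) =====
def Claim_equal_createseats : Prop := ∀ (rows : Int) (cols : Int), Dom_createseats rows cols → Spec_createseats rows cols (createseats rows cols)

-- ===== LEMMAS AND PROOFS =====

lemma pv_tl {α : Type} (l : List α) : l.toArray.toList = l := by simp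

-- the inner loop of A: appends one label per step and advances the counter
lemma pv_inner (l : List Int) : ∀ (s : Int) (acc : Array String),
    l.foldl (fun (p : Int × Array String) _col => (p.1 + 1, p.2.push ("s" ++ PySem.Int.toStr p.1))) (s, acc)
      = (s + l.length,
         (acc.toList ++ (List.range l.length).map (fun (k : Nat) => "s" ++ PySem.Int.toStr (s + (k : Int)))).toArray) := by
  induction l with
  | nil => intro s acc; simp
  | cons a l ih =>
    intro s acc
    simp only [List.foldl_cons]
    rw [ih]
    simp only [List.length_cons, Array.toList_push]
    refine Prod.ext ?_ ?_
    · push_cast; ring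
    · refine congrArg List.toArray ?_
      rw [List.range_succ_eq_map, List.map_cons, List.map_map, List.append_assoc,
        List.singleton_append]
      refine congrArg (HAppend.hAppend acc.toList) ?_
      refine congrArg₂ List.cons (by simp) ?_
      apply List.map_congr_left
      intro k _
      simp only [Function.comp, Nat.succ_eq_add_one]
      exact congrArg (fun z => "s" ++ PySem.Int.toStr z) (by push_cast; ring)

-- the outer loop of A, for an abstract per-row function f and row width C
lemma pv_outer (C : Int) (f : Int → List String) (l : List Int) : ∀ (s : Int) (acc : Array (List String)),
    l.foldl (fun (st : Int × Array (List String)) _row => (st.1 + C, st.2.push (f st.1))) (s, acc)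
      = (s + l.length * C,
         (acc.toList ++ (List.range l.length).map (fun (r : Nat) => f (s + (r : Int) * C))).toArray) := by
  induction l with
  | nil => intro s acc; simp
  | cons a l ih =>
    intro s acc
    simp only [List.foldl_cons]
    rw [ih]
    simp only [List.length_cons, Array.toList_push]
    refine Prod.ext ?_ ?_
    · push_cast; ring
    · refine congrArg List.toArray ?_
      rw [List.range_succ_eq_map, List.map_cons, List.map_map, List.append_assoc,
        List.singleton_append]
      refine congrArg (HAppend.hAppend acc.toList) ?_
      refine congrArg₂ List.cons (by simp) ?_
      apply List.map_congr_left
      intro r _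
      simp only [Function.comp, Nat.succ_eq_add_one]
      exact congrArg f (by push_cast; ring)

-- A in closed form
lemma pv_A (rows cols : Int) :
    createseats rows cols
      = (List.range rows.toNat).map
          (fun (r : Nat) => (List.range cols.toNat).map
            (fun (k : Nat) => "s" ++ PySem.Int.toStr (1 + (r : Int) * (cols.toNat : Int) + (k : Int)))) := by
  unfold createseats
  simp only [pv_inner, PySem.List.length_pyRange_one, sub_zero, pv_tl, List.nil_append]
  rw [pv_outer ((cols.toNat : Nat) : Int)
      (fun s => (List.range cols.toNat).map (fun (k : Nat) => "s" ++ PySem.Int.toStr (s + (k : Int))))]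
  simp only [PySem.List.length_pyRange_one, sub_zero, List.nil_append]

-- a contiguous chunk of a mapped range, by drop/take
lemma pv_chunk {α : Type} (g : Nat → α) (N a c : Nat) (h : a + c ≤ N) :
    (((List.range N).map g).drop a).take c = (List.range c).map (fun k => g (a + k)) := by
  apply List.ext_getElem
  · simp; omega
  · intro i h1 h2
    simp only [List.getElem_take, List.getElem_drop, List.getElem_map, List.getElem_range]

-- B in the same closed form
lemma pv_B (rows cols : Int) :
    createseats_alt rows cols
      = (List.range rows.toNat).map
          (fun (r : Nat) => (List.range cols.toNat).map
            (fun (k : Nat) => "s" ++ PySem.Int.toStr (1 + (r : Int) * (cols.toNat : Int) + (k : Int)))) := by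
  unfold createseats_alt
  dsimp only
  rw [PySem.List.pyRange_one 0 rows, PySem.List.pyRange_one 1 ((max rows 0) * (max cols 0) + 1)]
  simp only [sub_zero, add_sub_cancel_right, List.map_map]
  apply List.map_congr_left
  intro r hr
  have hr' : (r : Int) < rows := by
    have := List.mem_range.mp hr
    omega
  simp only [Function.comp, zero_add]
  by_cases hc : cols ≤ 0
  · -- empty flat list: every slice of it is empty, and each target row is empty too
    have hN : ((max rows 0) * (max cols 0)).toNat = 0 := by
      have : max cols 0 = 0 := by omega
      rw [this, mul_zero]; rfl
    have hc0 : cols.toNat = 0 := by omega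
    rw [hN, hc0]
    simp [PySem.List.slice]
  · rw [not_le] at hc
    have hrpos : 0 < rows := by omega
    have ha : (0:Int) ≤ (r : Int) * cols := mul_nonneg (by omega) (by omega)
    have hb : (0:Int) ≤ ((r : Int) + 1) * cols := mul_nonneg (by omega) (by omega)
    rw [PySem.List.slice_toNat _ ha hb]
    have haN : ((r : Int) * cols).toNat = r * cols.toNat := by
      have : ((r : Int) * cols) = ((r * cols.toNat : Nat) : Int) := by push_cast; rw [Int.toNat_of_nonneg (by omega)]
      omega
    have hbN : (((r : Int) + 1) * cols).toNat = (r + 1) * cols.toNat := by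
      have : (((r : Int) + 1) * cols) = (((r + 1) * cols.toNat : Nat) : Int) := by push_cast; rw [Int.toNat_of_nonneg (by omega)]
      omega
    have hNN : ((max rows 0) * (max cols 0)).toNat = rows.toNat * cols.toNat := by
      have h1 : max rows 0 = rows := by omega
      have h2 : max cols 0 = cols := by omega
      have : rows * cols = ((rows.toNat * cols.toNat : Nat) : Int) := by
        push_cast; rw [Int.toNat_of_nonneg (by omega), Int.toNat_of_nonneg (by omega)]
      rw [h1, h2]; omega
    have hsub : (r + 1) * cols.toNat - r * cols.toNat = cols.toNat := by
      rw [Nat.add_mul, Nat.one_mul, Nat.add_sub_cancel_left]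
    rw [haN, hbN, hNN, hsub]
    simp only [Function.comp_def]
    rw [pv_chunk (fun k => "s" ++ PySem.Int.toStr (1 + (k : Int))) (rows.toNat * cols.toNat)
        (r * cols.toNat) cols.toNat ?_]
    · apply List.map_congr_left
      intro k _
      refine congrArg (fun z => "s" ++ PySem.Int.toStr z) ?_
      push_cast; ring
    · have h1 : r + 1 ≤ rows.toNat := List.mem_range.mp hr
      calc r * cols.toNat + cols.toNat = (r + 1) * cols.toNat := by ring
        _ ≤ rows.toNat * cols.toNat := Nat.mul_le_mul_right _ h1

-- ===== VERDICT (by name: the statement is the Claim_ definition above) =====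
theorem createseats_spec : Claim_equal_createseats := by
  intro rows cols _
  unfold Spec_createseats
  rw [pv_A, pv_B]
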